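-- pv_equiv track=rewrite | github.com/zeroch/Cracking-The-Coding-Interview | python/removeZeroInMatrix.py | searchNum
-- ===== SOURCE A (Python) =====
-- def searchNum(mat, num):
--     row_list = []
--     col_list = []
--
--     for i in range(0, len(mat)):
--         for j in range(0, len(mat[i])):
--             if mat[i][j] == num:
--                 if i not in row_list:
--                     row_list.append(i)
--                 if j not in col_list:
--                     col_list.append(j)
--
--     return row_list, col_list
-- ===== SOURCE B (Python) =====
-- def searchNum(mat, num):
--     rows = [i for i, row in enumerate(mat) if num in row]
--     cols = []
--     seen = set()
--     for row in mat:
--         for j, x in enumerate(row):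
--             if x == num and j not in seen:
--                 seen.add(j)
--                 cols.append(j)
--     return rows, cols
-- ===== Notes on version B (the rewrite author's own statement) =====
-- stated objective: alternative
-- what changed: Replaces A's single nested index loop with two separate passes: rows via a short-circuiting per-row membership test (no column indexing, no list dedup scan), and columns via a row-major scan with an O(1)-membership seen set instead of repeated 'j not in col_list' list scans.
import Mathlib
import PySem

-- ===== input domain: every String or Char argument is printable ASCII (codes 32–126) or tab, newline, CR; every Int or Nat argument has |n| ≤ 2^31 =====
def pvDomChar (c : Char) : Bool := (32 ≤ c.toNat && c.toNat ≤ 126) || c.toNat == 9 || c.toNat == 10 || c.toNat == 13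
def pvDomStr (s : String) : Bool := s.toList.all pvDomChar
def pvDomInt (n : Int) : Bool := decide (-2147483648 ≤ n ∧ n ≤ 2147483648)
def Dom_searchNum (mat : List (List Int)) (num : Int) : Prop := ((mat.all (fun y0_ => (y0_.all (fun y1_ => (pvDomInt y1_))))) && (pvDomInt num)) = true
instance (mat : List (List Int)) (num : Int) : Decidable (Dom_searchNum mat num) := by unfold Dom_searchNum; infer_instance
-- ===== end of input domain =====

-- B: two separate passes (per-row membership for rows; a seen-set scan for columns) instead of A's single nested loop with list-scan dedup.

-- ===== PORT A =====
-- inner loop 'for j in range(0, len(mat[i]))' as structural recursion over the row with index counter j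
def aRow (num i : Int) (row : List Int) (j : Int) (st : List Int × List Int) : List Int × List Int :=
  match row with
  | [] => st
  | x :: rest =>
      aRow num i rest (j + 1)
        (if x = num then
          ((if i ∈ st.1 then st.1 else st.1 ++ [i]),
           (if j ∈ st.2 then st.2 else st.2 ++ [j]))
        else st)

-- outer loop 'for i in range(0, len(mat))'
def aMat (num : Int) (mat : List (List Int)) (i : Int) (st : List Int × List Int) : List Int × List Int :=
  match mat with
  | [] => st
  | row :: rest => aMat num rest (i + 1) (aRow num i row 0 st)

def searchNum (mat : List (List Int)) (num : Int) : List Int × List Int :=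
  aMat num mat 0 ([], [])

-- ===== PORT B =====
-- rows = [i for i, row in enumerate(mat) if num in row]
def bRows (num : Int) (mat : List (List Int)) (i : Int) : List Int :=
  match mat with
  | [] => []
  | row :: rest => (if num ∈ row then [i] else []) ++ bRows num rest (i + 1)

-- inner loop 'for j, x in enumerate(row): if x == num and j not in seen: …'
def bColsRow (num : Int) (row : List Int) (j : Int) (seen : PySem.Set Int) (cols : List Int) :
    PySem.Set Int × List Int :=
  match row with
  | [] => (seen, cols)
  | x :: rest =>
      if x = num ∧ ¬ (PySem.Set.contains seen j) then
        bColsRow num rest (j + 1) (PySem.Set.add seen j) (cols ++ [j])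
      else
        bColsRow num rest (j + 1) seen cols

-- outer loop 'for row in mat:'
def bCols (num : Int) (mat : List (List Int)) (seen : PySem.Set Int) (cols : List Int) : List Int :=
  match mat with
  | [] => cols
  | row :: rest =>
      let p := bColsRow num row 0 seen cols
      bCols num rest p.1 p.2

def searchNum_alt (mat : List (List Int)) (num : Int) : List Int × List Int :=
  (bRows num mat 0, bCols num mat PySem.Set.empty [])

-- ===== PRECONDITION & SPEC =====
def Spec_searchNum (mat : List (List Int)) (num : Int) (out : List Int × List Int) : Prop := out = searchNum_alt mat num
instance (mat : List (List Int)) (num : Int) (out : List Int × List Int) : Decidable (Spec_searchNum mat num out) := by unfold Spec_searchNum; infer_instance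

-- ===== CLAIM (what is proved, stated in full; the proofs are below) =====
def Claim_equal_searchNum : Prop := ∀ (mat : List (List Int)) (num : Int), Dom_searchNum mat num → Spec_searchNum mat num (searchNum mat num)

-- ===== LEMMAS AND PROOFS =====

-- the column half of A's per-row step, isolated (it only touches st.2)
def colStep (num : Int) (row : List Int) (j : Int) (c : List Int) : List Int :=
  match row with
  | [] => c
  | x :: rest => colStep num rest (j + 1) (if x = num then (if j ∈ c then c else c ++ [j]) else c)

theorem aRow_snd (num i : Int) (row : List Int) :
    ∀ j st, (aRow num i row j st).2 = colStep num row j st.2 := by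
  induction row with
  | nil => intro j st; rfl
  | cons x rest ih =>
      intro j st
      simp only [aRow, colStep]
      by_cases hx : x = num <;> simp [hx, ih]

theorem aRow_fst (num i : Int) (row : List Int) :
    ∀ j st, (aRow num i row j st).1 =
      if num ∈ row ∧ i ∉ st.1 then st.1 ++ [i] else st.1 := by
  induction row with
  | nil => intro j st; simp [aRow]
  | cons x rest ih =>
      intro j st
      simp only [aRow]
      by_cases hx : x = num
      · by_cases hi : i ∈ st.1
        · simp [hx, hi, ih]
        · simp [hx, hi, ih]
      · rw [ih]
        have hmem : num ∈ x :: rest ↔ num ∈ rest := by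
          constructor
          · intro h; rcases List.mem_cons.mp h with h | h
            · exact absurd h.symm hx
            · exact h
          · intro h; exact List.mem_cons_of_mem _ h
        simp [hx, hmem]

theorem bColsRow_diag (num : Int) (row : List Int) :
    ∀ j c, bColsRow num row j c c = (colStep num row j c, colStep num row j c) := by
  induction row with
  | nil => intro j c; rfl
  | cons x rest ih =>
      intro j c
      simp only [bColsRow, colStep]
      by_cases hx : x = num
      · by_cases hj : j ∈ c
        · simp [hx, hj, PySem.Set.contains, ih]
        · simp [hx, hj, PySem.Set.contains, PySem.Set.add, ih]
      · simp [hx, ih]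

theorem aMat_eq (num : Int) (mat : List (List Int)) :
    ∀ i r c, (∀ x ∈ r, x < i) →
      aMat num mat i (r, c) = (r ++ bRows num mat i, bCols num mat c c) := by
  induction mat with
  | nil => intro i r c _; simp [aMat, bRows, bCols]
  | cons row rest ih =>
      intro i r c hlt
      have hi : i ∉ r := fun h => absurd (hlt i h) (lt_irrefl i)
      have hfst : (aRow num i row 0 (r, c)).1 = r ++ (if num ∈ row then [i] else []) := by
        rw [aRow_fst]
        by_cases hm : num ∈ row <;> simp [hm, hi]
      have hsnd : (aRow num i row 0 (r, c)).2 = colStep num row 0 c := aRow_snd num i row 0 (r, c)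
      have hst : aRow num i row 0 (r, c) =
          (r ++ (if num ∈ row then [i] else []), colStep num row 0 c) := by
        exact Prod.ext hfst hsnd
      have hlt' : ∀ x ∈ r ++ (if num ∈ row then [i] else []), x < i + 1 := by
        intro x hx
        rcases List.mem_append.mp hx with h | h
        · exact lt_trans (hlt x h) (by omega)
        · by_cases hm : num ∈ row
          · simp [hm] at h; omega
          · simp [hm] at h
      simp only [aMat, hst]
      rw [ih (i + 1) _ _ hlt']
      simp only [bRows, bCols, bColsRow_diag]
      simp [List.append_assoc]

-- ===== VERDICT (by name: the statement is the Claim_ definition above) =====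
theorem searchNum_spec : Claim_equal_searchNum := by
  intro mat num _
  show searchNum mat num = searchNum_alt mat num
  unfold searchNum searchNum_alt
  rw [aMat_eq num mat 0 [] [] (by intro x hx; simp at hx)]
  rfl
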